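-- pv_equiv track=rewrite | github.com/pypi-data/pypi-mirror-30 | packages/fidia/fidia-0.4rc1.tar.gz/fidia-0.4rc1/fidia/utilities.py | none_at_indices
-- ===== SOURCE A (Python) =====
-- def none_at_indices(tup, indices):
--     result = tuple()
--     for index in range(len(tup)):
--         if index in indices:
--             result += (None,)
--         else:
--             result += (tup[index],)
--     return result
-- ===== SOURCE B (Python) =====
-- def none_at_indices(tup, indices):
--     result = list(tup)
--     for index in indices:
--         if 0 <= index < len(tup):
--             result[index] = None
--     return tuple(result)
-- ===== Notes on version B (the rewrite author's own statement) =====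
-- stated objective: faster
-- what changed: B copies the tuple into a mutable list once and assigns None at each in-range index while iterating over the index collection, instead of A's scan of every position with an 'index in indices' membership test and repeated tuple concatenation.
import Mathlib
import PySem

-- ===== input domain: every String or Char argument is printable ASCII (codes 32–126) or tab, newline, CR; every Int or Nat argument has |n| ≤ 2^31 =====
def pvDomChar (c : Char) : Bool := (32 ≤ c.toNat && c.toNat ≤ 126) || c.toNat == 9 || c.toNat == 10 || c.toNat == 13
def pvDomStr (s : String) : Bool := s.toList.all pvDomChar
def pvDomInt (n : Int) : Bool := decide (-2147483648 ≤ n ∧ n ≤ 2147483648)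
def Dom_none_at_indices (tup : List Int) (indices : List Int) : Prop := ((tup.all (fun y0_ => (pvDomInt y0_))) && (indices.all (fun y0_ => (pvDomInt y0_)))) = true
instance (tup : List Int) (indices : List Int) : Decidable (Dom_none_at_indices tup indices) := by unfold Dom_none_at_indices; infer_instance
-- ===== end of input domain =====

-- B rebuilds the tuple via one mutable copy updated at each in-range index (no per-position membership scan, no repeated concatenation).

-- ===== PORT A =====
-- Literal port of A: loop over range(len(tup)); growing tuple by concatenation.
-- The loop index is always in range, so pyGet? is `some` there (Python never raises here).
def none_at_indices (tup : List Int) (indices : List Int) : List (Option Int) :=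
  (PySem.List.pyRange 0 tup.length 1).foldl
    (fun result index =>
      if index ∈ indices then result ++ [none]
      else result ++ [PySem.List.pyGet? tup index])
    []

-- ===== PORT B =====
-- Literal port of B: result = list(tup); for index in indices: if 0 <= index < len(tup): result[index] = None.
def none_at_indices_alt (tup : List Int) (indices : List Int) : List (Option Int) :=
  indices.foldl
    (fun result index =>
      if 0 ≤ index ∧ index < (tup.length : Int) then result.set index.toNat none
      else result)
    (tup.map some)

-- ===== PRECONDITION & SPEC =====
def Spec_none_at_indices (tup : List Int) (indices : List Int) (out : List (Option Int)) : Prop := out = none_at_indices_alt tup indices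
instance (tup : List Int) (indices : List Int) (out : List (Option Int)) : Decidable (Spec_none_at_indices tup indices out) := by unfold Spec_none_at_indices; infer_instance

-- ===== CLAIM (what is proved, stated in full; the proofs are below) =====
def Claim_equal_none_at_indices : Prop := ∀ (tup : List Int) (indices : List Int), Dom_none_at_indices tup indices → Spec_none_at_indices tup indices (none_at_indices tup indices)

-- ===== LEMMAS AND PROOFS =====

-- A's loop appends one element per position: it is a map over the range.
theorem noneA_eq_map (tup indices : List Int) :
    none_at_indices tup indices =
      (PySem.List.pyRange 0 tup.length 1).map
        (fun index => if index ∈ indices then none else PySem.List.pyGet? tup index) := by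
  unfold none_at_indices
  have h : ∀ (l : List Int) (acc : List (Option Int)),
      l.foldl (fun result index =>
        if index ∈ indices then result ++ [none]
        else result ++ [PySem.List.pyGet? tup index]) acc
      = acc ++ l.map (fun index => if index ∈ indices then none else PySem.List.pyGet? tup index) := by
    intro l
    induction l with
    | nil => intro acc; simp
    | cons x xs ih =>
      intro acc
      simp only [List.foldl_cons, List.map_cons, ih]
      by_cases hx : x ∈ indices <;> simp [hx]
  simpa using h _ []

-- B's fold, read off at one position.
theorem noneB_get (n : Nat) (inds : List Int) :
    ∀ (acc : List (Option Int)), acc.length = n → ∀ (k : Nat), k < n →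
      (inds.foldl
        (fun result index =>
          if 0 ≤ index ∧ index < (n : Int) then result.set index.toNat none else result)
        acc)[k]? = if (k : Int) ∈ inds then some none else acc[k]? := by
  induction inds with
  | nil => intro acc hacc k hk; simp
  | cons i rest ih =>
    intro acc hacc k hk
    simp only [List.foldl_cons]
    by_cases hg : 0 ≤ i ∧ i < (n : Int)
    · rw [if_pos hg]
      have hlen : (acc.set i.toNat none).length = n := by simp [hacc]
      rw [ih _ hlen k hk]
      by_cases hm : (k : Int) ∈ rest
      · simp [hm, List.mem_cons]
      · by_cases hik : i = (k : Int)
        · have : i.toNat = k := by omega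
          simp [hm, hik, hacc, hk]
        · have : i.toNat ≠ k := by omega
          simp [hm, this, Ne.symm hik]
    · rw [if_neg hg]
      rw [ih _ hacc k hk]
      have hik : i ≠ (k : Int) := by
        intro h; apply hg; constructor <;> omega
      by_cases hm : (k : Int) ∈ rest <;> simp [hm, Ne.symm hik]

theorem noneB_length (n : Nat) (inds : List Int) :
    ∀ (acc : List (Option Int)),
      (inds.foldl
        (fun result index =>
          if 0 ≤ index ∧ index < (n : Int) then result.set index.toNat none else result)
        acc).length = acc.length := by
  induction inds with
  | nil => intro acc; simp
  | cons i rest ih =>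
    intro acc
    simp only [List.foldl_cons]
    by_cases hg : 0 ≤ i ∧ i < (n : Int) <;> simp [hg, ih]

-- ===== VERDICT (by name: the statement is the Claim_ definition above) =====
theorem none_at_indices_spec : Claim_equal_none_at_indices := by
  intro tup indices _
  unfold Spec_none_at_indices
  rw [noneA_eq_map]
  apply List.ext_getElem?
  intro k
  by_cases hk : k < tup.length
  · rw [PySem.List.getElem?_map_pyRange_zero _ _ _ hk]
    unfold none_at_indices_alt
    rw [noneB_get tup.length indices (tup.map some) (by simp) k hk]
    by_cases hm : (k : Int) ∈ indices
    · simp [hm]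
    · simp [hm, hk]
  · have h1 : ((PySem.List.pyRange 0 tup.length 1).map
        (fun index => if index ∈ indices then none else PySem.List.pyGet? tup index)).length
        = tup.length := by
      simp [PySem.List.length_pyRange_one]
    have h2 : (none_at_indices_alt tup indices).length = tup.length := by
      unfold none_at_indices_alt
      rw [noneB_length]; simp
    rw [List.getElem?_eq_none (by omega), List.getElem?_eq_none (by omega)]
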